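-- pv_equiv track=rewrite | github.com/youngzhou1999/CUMCM2020B | 问题一计算时间消耗函数.py | fmine
-- ===== SOURCE A (Python) =====
-- w1 = 5
--
-- w2 = 8
--
-- f1 = 7
--
-- f2 = 6
--
-- ws = 10
--
-- fs = 10
--
-- kg1 = 29
--
-- kg2 = 36
--
-- kg3 = 50
--
-- def fmine(t0,t1,weather):
--     count = t0
--     kgc = 0
--     wc = 0
--     fc = 0
--     while(count !=t1):
--         if(weather[count]==1):
--             kgc = kgc + kg1*3
--             wc = wc +3*w1
--             fc = fc + 3*f1
--         elif(weather[count]==2):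
--             kgc = kgc + kg2*3
--             wc = wc +3*w2
--             fc = fc + 3*f2
--         else:
--             kgc = kgc + 3*kg3
--             #t1 = t1 + 1
--             wc = wc +3*ws
--             fc = fc + 3*fs
--         count = count + 1
--     return t1,kgc,wc,fc
-- ===== SOURCE B (Python) =====
-- w1 = 5
-- w2 = 8
-- f1 = 7
-- f2 = 6
-- ws = 10
-- fs = 10
-- kg1 = 29
-- kg2 = 36
-- kg3 = 50
--
-- def fmine(t0, t1, weather):
--     # tally the frequency of each weather category over the days [t0, t1)
--     freq = {}
--     i = t0
--     while i != t1:
--         w = weather[i]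
--         freq[w] = freq.get(w, 0) + 1
--         i = i + 1
--     n1 = freq.get(1, 0)
--     n2 = freq.get(2, 0)
--     n3 = (t1 - t0) - n1 - n2
--     # closed-form cost pass over the three category counts
--     return t1, 3*(kg1*n1 + kg2*n2 + kg3*n3), 3*(w1*n1 + w2*n2 + ws*n3), 3*(f1*n1 + f2*n2 + fs*n3)
-- ===== Notes on version B (the rewrite author's own statement) =====
-- stated objective: alternative
-- what changed: Replaces A's branch-per-category accumulation of three running cost sums with a dict frequency tally of the weather categories over the day walk, followed by a closed-form arithmetic pass computing the three totals from the counts.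
import Mathlib
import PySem

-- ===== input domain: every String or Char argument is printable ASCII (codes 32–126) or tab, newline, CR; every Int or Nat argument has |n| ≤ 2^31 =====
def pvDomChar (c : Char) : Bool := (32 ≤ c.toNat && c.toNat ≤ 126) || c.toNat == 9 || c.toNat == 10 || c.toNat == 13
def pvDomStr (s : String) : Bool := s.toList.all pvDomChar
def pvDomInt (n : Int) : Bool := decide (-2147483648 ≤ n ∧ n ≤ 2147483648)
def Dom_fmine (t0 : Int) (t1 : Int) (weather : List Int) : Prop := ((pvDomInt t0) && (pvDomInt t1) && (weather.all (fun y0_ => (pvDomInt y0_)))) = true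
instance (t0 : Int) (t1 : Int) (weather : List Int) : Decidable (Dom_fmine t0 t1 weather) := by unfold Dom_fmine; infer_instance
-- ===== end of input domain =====

-- B replaces A's three per-branch cost accumulators by a frequency tally of the weather categories
-- followed by a closed-form cost pass over the three counts (objective: alternative).

-- ===== PORT A =====
-- module constants
def pvW1 : Int := 5
def pvW2 : Int := 8
def pvF1 : Int := 7
def pvF2 : Int := 6
def pvWs : Int := 10
def pvFs : Int := 10
def pvKg1 : Int := 29
def pvKg2 : Int := 36
def pvKg3 : Int := 50

-- the while-loop of A; fuel = number of remaining iterations (t1 - count).toNat.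
-- weather[count] is PySem.List.pyGet?; the none (IndexError) case is excluded by Pre_fmine.
def fmineLoop (weather : List Int) (t1 : Int) : Nat → Int → Int → Int → Int → Int × Int × Int × Int
  | 0, _, kgc, wc, fc => (t1, kgc, wc, fc)
  | fuel + 1, count, kgc, wc, fc =>
    if count = t1 then (t1, kgc, wc, fc)
    else
      match PySem.List.pyGet? weather count with
      | none => (t1, kgc, wc, fc)   -- IndexError in Python; outside Pre_fmine
      | some w =>
        if w = 1 then
          fmineLoop weather t1 fuel (count + 1) (kgc + pvKg1 * 3) (wc + 3 * pvW1) (fc + 3 * pvF1)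
        else if w = 2 then
          fmineLoop weather t1 fuel (count + 1) (kgc + pvKg2 * 3) (wc + 3 * pvW2) (fc + 3 * pvF2)
        else
          fmineLoop weather t1 fuel (count + 1) (kgc + 3 * pvKg3) (wc + 3 * pvWs) (fc + 3 * pvFs)

def fmine (t0 : Int) (t1 : Int) (weather : List Int) : Int × Int × Int × Int :=
  fmineLoop weather t1 (t1 - t0).toNat t0 0 0 0

-- ===== PORT B =====
-- the tally loop of B: freq[weather[i]] += 1 for i walking from t0 to t1; fuel = remaining iterations.
-- weather[i] is PySem.List.pyGet?; the none (IndexError) case is excluded by Pre_fmine.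
def fmineTally (weather : List Int) (t1 : Int) : Nat → Int → PySem.Dict Int Int → PySem.Dict Int Int
  | 0, _, freq => freq
  | fuel + 1, i, freq =>
    if i = t1 then freq
    else
      match PySem.List.pyGet? weather i with
      | none => freq   -- IndexError in Python; outside Pre_fmine
      | some w => fmineTally weather t1 fuel (i + 1) (freq.insert w (freq.getD w 0 + 1))

def fmine_alt (t0 : Int) (t1 : Int) (weather : List Int) : Int × Int × Int × Int :=
  let freq := fmineTally weather t1 (t1 - t0).toNat t0 PySem.Dict.empty
  let n1 : Int := freq.getD 1 0
  let n2 : Int := freq.getD 2 0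
  let n3 : Int := (t1 - t0) - n1 - n2
  (t1, 3 * (pvKg1 * n1 + pvKg2 * n2 + pvKg3 * n3),
       3 * (pvW1 * n1 + pvW2 * n2 + pvWs * n3),
       3 * (pvF1 * n1 + pvF2 * n2 + pvFs * n3))

-- ===== PRECONDITION & SPEC =====
-- exactly the inputs on which A returns: the loop must reach t1 (t0 ≤ t1) and every index
-- in [t0, t1) must be a valid Python index of weather (else IndexError).
def Pre_fmine (t0 : Int) (t1 : Int) (weather : List Int) : Prop :=
  t0 ≤ t1 ∧ (t0 = t1 ∨ (-(weather.length : Int) ≤ t0 ∧ t1 ≤ (weather.length : Int)))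
instance (t0 : Int) (t1 : Int) (weather : List Int) : Decidable (Pre_fmine t0 t1 weather) := by unfold Pre_fmine; infer_instance

def pvWitness_fmine : Int × Int × List Int := (0, 3, [1, 2, 5])

def Spec_fmine (t0 : Int) (t1 : Int) (weather : List Int) (out : Int × Int × Int × Int) : Prop := out = fmine_alt t0 t1 weather
instance (t0 : Int) (t1 : Int) (weather : List Int) (out : Int × Int × Int × Int) : Decidable (Spec_fmine t0 t1 weather out) := by unfold Spec_fmine; infer_instance

-- ===== CLAIM (what is proved, stated in full; the proofs are below) =====
def Claim_equal_fmine : Prop := ∀ (t0 : Int) (t1 : Int) (weather : List Int), Dom_fmine t0 t1 weather → Pre_fmine t0 t1 weather → Spec_fmine t0 t1 weather (fmine t0 t1 weather)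

-- ===== LEMMAS AND PROOFS =====

theorem pyGet?_eq_some_pyGetD (xs : List Int) (i : Int)
    (h : PySem.Raise.InRange xs.length i) :
    PySem.List.pyGet? xs i = some (PySem.List.pyGetD xs i 0) := by
  cases hg : PySem.List.pyGet? xs i with
  | none => exact absurd h ((PySem.List.pyGet?_eq_none_iff xs i).mp hg)
  | some w =>
    have hd : PySem.List.pyGetD xs i 0 = w := by
      simp [PySem.List.pyGetD, PySem.List.pyGet?] at hg ⊢
      simp [hg]
    rw [hd]

-- B's closed-form post-pass, parameterised by the accumulators of A's loop.
theorem fmineLoop_eq (weather : List Int) (t1 : Int) :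
    ∀ (fuel : Nat) (count kgc wc fc : Int),
      count + fuel = t1 →
      (∀ i : Int, count ≤ i → i < t1 → PySem.Raise.InRange weather.length i) →
      fmineLoop weather t1 fuel count kgc wc fc =
        (let vals := (PySem.List.pyRange count t1 1).map (fun i => PySem.List.pyGetD weather i 0)
         let n1 : Int := PySem.List.count vals 1
         let n2 : Int := PySem.List.count vals 2
         let n3 : Int := PySem.List.len vals - n1 - n2
         (t1, kgc + 3 * (pvKg1 * n1 + pvKg2 * n2 + pvKg3 * n3),
              wc + 3 * (pvW1 * n1 + pvW2 * n2 + pvWs * n3),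
              fc + 3 * (pvF1 * n1 + pvF2 * n2 + pvFs * n3))) := by
  intro fuel
  induction fuel with
  | zero =>
    intro count kgc wc fc hsum hidx
    have hc : count = t1 := by omega
    subst hc
    rw [fmineLoop]
    simp [PySem.List.pyRange_one_eq_nil (le_refl count), PySem.List.count_eq, PySem.List.len_eq]
  | succ fuel ih =>
    intro count kgc wc fc hsum hidx
    have hlt : count < t1 := by omega
    have hin := hidx count le_rfl hlt
    rw [fmineLoop, if_neg (by omega), pyGet?_eq_some_pyGetD weather count hin]
    dsimp only
    have hcons := PySem.List.pyRange_one_cons hlt (a := count) (b := t1)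
    have hrec := fun kgc wc fc => ih (count + 1) kgc wc fc (by omega)
      (fun i hi h2 => hidx i (by omega) h2)
    by_cases h1 : PySem.List.pyGetD weather count 0 = 1
    · rw [if_pos h1, hrec]
      simp only [hcons, List.map_cons, PySem.List.count_eq, PySem.List.len_eq, List.count_cons,
        List.length_cons, h1, pvKg1, pvKg2, pvKg3, pvW1, pvW2, pvWs, pvF1, pvF2, pvFs]
      norm_num
      refine ⟨by ring, by ring, by ring⟩
    · by_cases h2 : PySem.List.pyGetD weather count 0 = 2
      · rw [if_neg h1, if_pos h2, hrec]
        simp only [hcons, List.map_cons, PySem.List.count_eq, PySem.List.len_eq, List.count_cons,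
          List.length_cons, h2, pvKg1, pvKg2, pvKg3, pvW1, pvW2, pvWs, pvF1, pvF2, pvFs]
        norm_num
        refine ⟨by ring, by ring, by ring⟩
      · rw [if_neg h1, if_neg h2, hrec]
        simp only [hcons, List.map_cons, PySem.List.count_eq, PySem.List.len_eq, List.count_cons,
          List.length_cons, pvKg1, pvKg2, pvKg3, pvW1, pvW2, pvWs, pvF1, pvF2, pvFs]
        have e1 : ((PySem.List.pyGetD weather count 0 == 1) : Bool) = false := by
          simp [h1]
        have e2 : ((PySem.List.pyGetD weather count 0 == 2) : Bool) = false := by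
          simp [h2]
        simp only [e1, e2]
        norm_num
        refine ⟨by ring, by ring, by ring⟩


-- B's tally loop counts each category: getD after the walk = before + number of occurrences.
theorem fmineTally_getD (weather : List Int) (t1 : Int) :
    ∀ (fuel : Nat) (i : Int) (freq : PySem.Dict Int Int) (v : Int),
      i + fuel = t1 →
      (∀ j : Int, i ≤ j → j < t1 → PySem.Raise.InRange weather.length j) →
      (fmineTally weather t1 fuel i freq).getD v 0 =
        freq.getD v 0 +
          (((PySem.List.pyRange i t1 1).map (fun j => PySem.List.pyGetD weather j 0)).count v : Int) := by
  intro fuel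
  induction fuel with
  | zero =>
    intro i freq v hsum hidx
    have hi : i = t1 := by omega
    subst hi
    rw [fmineTally]
    simp [PySem.List.pyRange_one_eq_nil (le_refl i)]
  | succ fuel ih =>
    intro i freq v hsum hidx
    have hlt : i < t1 := by omega
    have hin := hidx i le_rfl hlt
    rw [fmineTally, if_neg (by omega), pyGet?_eq_some_pyGetD weather i hin]
    dsimp only
    rw [ih (i + 1) _ v (by omega) (fun j hj h2 => hidx j (by omega) h2)]
    rw [PySem.List.pyRange_one_cons hlt, List.map_cons, List.count_cons,
      PySem.Dict.getD_insert]
    by_cases hv : v = PySem.List.pyGetD weather i 0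
    · simp [hv]
      omega
    · have : ((PySem.List.pyGetD weather i 0 == v) : Bool) = false := by
        simp [Ne.symm hv]
      simp [hv, this]

-- ===== VERDICT =====
theorem fmine_spec : Claim_equal_fmine := by
  intro t0 t1 weather _ hpre
  unfold Spec_fmine fmine fmine_alt
  have hle : t0 ≤ t1 := hpre.1
  have hidx : ∀ i : Int, t0 ≤ i → i < t1 → PySem.Raise.InRange weather.length i := by
    intro i h0 h1
    rcases hpre.2 with h | ⟨ha, hb⟩
    · omega
    · constructor <;> omega
  rw [fmineLoop_eq weather t1 (t1 - t0).toNat t0 0 0 0 (by omega) hidx]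
  dsimp only
  rw [fmineTally_getD weather t1 (t1 - t0).toNat t0 PySem.Dict.empty 1 (by omega) hidx]
  rw [fmineTally_getD weather t1 (t1 - t0).toNat t0 PySem.Dict.empty 2 (by omega) hidx]
  simp only [PySem.List.count_eq, PySem.List.len_eq, PySem.Dict.getD_empty, List.length_map]
  rw [PySem.List.length_pyRange_one, Int.toNat_of_nonneg (by omega : (0:Int) ≤ t1 - t0)]
  simp only [Prod.mk.injEq]
  exact ⟨trivial, by ring, by ring, by ring⟩
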